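-- pv_equiv track=rewrite | github.com/kannan5/Algorithms-And-DataStructures | DynamicProgramming/Problems/longest_subsequence.py | subsequent_num
-- ===== SOURCE A (Python) =====
-- def subsequent_num(arr):
--     len_arr = len(arr)
--     dp = [0 for _ in range(0, len_arr)]
--     dp[0] = 1
--     for i in range(0, len_arr):
--         dp[i] = 1
--         for j in range(0, i):
--             curr = dp[j]
--             if arr[i] > arr[j]:
--                 curr += 1
--             dp[i] = max(dp[i], curr)
--     return dp[i]
-- ===== SOURCE B (Python) =====
-- def subsequent_num(arr):
--     # O(n) monotonic stack: dp[i] = max(dp[i-1], dp[k]+1) where k is the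
--     # nearest previous index with arr[k] < arr[i] (dp is non-decreasing).
--     stack = []  # pairs (value, dp value), values strictly increasing bottom->top
--     prev = 0
--     for x in arr:
--         while stack and stack[-1][0] >= x:
--             stack.pop()
--         cur = max(prev, 1)
--         if stack:
--             cur = max(cur, stack[-1][1] + 1)
--         stack.append((x, cur))
--         prev = cur
--     return prev
-- ===== Notes on version B (the rewrite author's own statement) =====
-- stated objective: faster
-- what changed: Replaced the O(n^2) nested-loop dp (dp[i] = max over all j<i of dp[j] plus an increment) by a single O(n) pass: since dp is non-decreasing, dp[i] = max(dp[i-1], dp[k]+1) where k is the nearest previous index with a strictly smaller value, found with a monotonic stack.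
import Mathlib
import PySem

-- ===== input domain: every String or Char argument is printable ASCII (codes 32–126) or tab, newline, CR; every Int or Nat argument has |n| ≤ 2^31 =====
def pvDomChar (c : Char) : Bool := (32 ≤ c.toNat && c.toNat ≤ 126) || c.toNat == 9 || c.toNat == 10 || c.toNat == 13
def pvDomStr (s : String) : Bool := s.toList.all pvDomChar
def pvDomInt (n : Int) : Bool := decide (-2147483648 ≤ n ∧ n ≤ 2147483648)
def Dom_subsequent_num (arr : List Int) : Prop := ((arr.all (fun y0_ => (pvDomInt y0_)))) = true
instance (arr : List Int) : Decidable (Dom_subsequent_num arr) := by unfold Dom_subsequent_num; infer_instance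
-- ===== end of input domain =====

-- B replaces A's O(n^2) nested dp loops by one O(n) monotonic-stack pass (dp is
-- non-decreasing, so dp[i] = max(dp[i-1], dp[nearest previous smaller]+1)).

-- ===== PORT A =====
-- inner loop of A: for j in range(0, i): curr = dp[j] (+1 if arr[i] > arr[j]); dp[i] = max(dp[i], curr)
-- dp[i] starts at 1 and is only read as the running maximum, carried here as the fold accumulator
def pvInnerA (arr dp : List Int) (i : Nat) : Int :=
  (List.range i).foldl (fun acc j =>
    let curr := dp.getD j 0 + (if arr.getD i 0 > arr.getD j 0 then (1 : Int) else 0)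
    max acc curr) 1

def pvStepA (arr : List Int) (dp : List Int) (i : Nat) : List Int :=
  dp.set i (pvInnerA arr dp i)

def subsequent_num (arr : List Int) : Int :=
  let len_arr := arr.length
  let dp0 := (List.replicate len_arr (0 : Int)).set 0 1   -- dp[0] = 1 (IndexError on []: excluded by Pre_)
  let dp := (List.range len_arr).foldl (pvStepA arr) dp0
  dp.getD (len_arr - 1) 0                                  -- return dp[i] with i = len_arr-1 after the loop

-- ===== PORT B =====
-- while stack and stack[-1][0] >= x: stack.pop()
def pvPop (x : Int) : List (Int × Int) → List (Int × Int)
  | [] => []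
  | (v, d) :: rest => if v ≥ x then pvPop x rest else (v, d) :: rest

def pvStepB (st : List (Int × Int) × Int) (x : Int) : List (Int × Int) × Int :=
  let stack := pvPop x st.1
  let cur := match stack with
    | [] => max st.2 1
    | (_, d) :: _ => max (max st.2 1) (d + 1)
  ((x, cur) :: stack, cur)

def subsequent_num_alt (arr : List Int) : Int :=
  (arr.foldl pvStepB ([], 0)).2

-- ===== PRECONDITION & SPEC =====
-- A raises IndexError on the empty list (dp[0] = 1 on an empty dp); excluded.
def Pre_subsequent_num (arr : List Int) : Prop := arr ≠ []
instance (arr : List Int) : Decidable (Pre_subsequent_num arr) := by unfold Pre_subsequent_num; infer_instance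
def pvWitness_subsequent_num : List Int := [3, 1, 2]

def Spec_subsequent_num (arr : List Int) (out : Int) : Prop := out = subsequent_num_alt arr
instance (arr : List Int) (out : Int) : Decidable (Spec_subsequent_num arr out) := by unfold Spec_subsequent_num; infer_instance

-- ===== CLAIM (what is proved, stated in full; the proofs are below) =====
def Claim_equal_subsequent_num : Prop := ∀ (arr : List Int), Dom_subsequent_num arr → Pre_subsequent_num arr → Spec_subsequent_num arr (subsequent_num arr)

-- ===== LEMMAS AND PROOFS =====

-- reference dp: pvD arr i is the value A's dp[i] has from the end of outer iteration i on
def pvDp0 (arr : List Int) : List Int := (List.replicate arr.length (0 : Int)).set 0 1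
def pvAcc (arr : List Int) (m : Nat) : List Int := (List.range m).foldl (pvStepA arr) (pvDp0 arr)
def pvD (arr : List Int) (i : Nat) : Int := pvInnerA arr (pvAcc arr i) i

def pvF (arr : List Int) (i j : Nat) : Int :=
  pvD arr j + (if arr.getD i 0 > arr.getD j 0 then (1 : Int) else 0)
def pvG (arr : List Int) (i : Nat) : Int :=
  (List.range i).foldl (fun a j => max a (pvF arr i j)) 1

-- nearest previous strictly smaller: largest j < m with arr[j] < x
def pvLast (arr : List Int) (x : Int) : Nat → Option Nat
  | 0 => none
  | m + 1 => if arr.getD m 0 < x then some m else pvLast arr x m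

-- ghost index stack: indices on B's stack after m elements
def pvStk (arr : List Int) : Nat → List Nat
  | 0 => []
  | m + 1 => m :: (pvStk arr m).dropWhile (fun j => decide (arr.getD m 0 ≤ arr.getD j 0))

-- generic fold-max lemmas
theorem pv_foldl_congr_mem {α β : Type} (l : List α) (f g : β → α → β) (b : β)
    (h : ∀ c a, a ∈ l → f c a = g c a) : l.foldl f b = l.foldl g b := by
  induction l generalizing b with
  | nil => rfl
  | cons x xs ih =>
      simp only [List.foldl_cons]
      rw [h b x (by simp)]
      exact ih _ (fun c a ha => h c a (by simp [ha]))

theorem pv_le_foldl_max_init {α : Type} (f : α → Int) (l : List α) (init : Int) :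
    init ≤ l.foldl (fun a x => max a (f x)) init := by
  induction l generalizing init with
  | nil => simp
  | cons x xs ih => exact le_trans (le_max_left _ _) (ih (max init (f x)))

theorem pv_le_foldl_max_mem {α : Type} (f : α → Int) (l : List α) (init : Int)
    (x : α) (hx : x ∈ l) : f x ≤ l.foldl (fun a y => max a (f y)) init := by
  induction l generalizing init with
  | nil => simp at hx
  | cons y ys ih =>
      rcases List.mem_cons.mp hx with h | h
      · subst h
        exact le_trans (le_max_right _ _) (pv_le_foldl_max_init f ys _)
      · exact ih _ h

theorem pv_foldl_max_le {α : Type} (f : α → Int) (l : List α) (init b : Int)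
    (h0 : init ≤ b) (h : ∀ x ∈ l, f x ≤ b) :
    l.foldl (fun a x => max a (f x)) init ≤ b := by
  induction l generalizing init with
  | nil => simpa using h0
  | cons x xs ih =>
      exact ih _ (max_le h0 (h x (by simp))) (fun y hy => h y (by simp [hy]))

theorem pvAcc_succ (arr : List Int) (m : Nat) :
    pvAcc arr (m + 1) = (pvAcc arr m).set m (pvInnerA arr (pvAcc arr m) m) := by
  simp [pvAcc, List.range_succ, List.foldl_append, pvStepA]

theorem pvAcc_length (arr : List Int) (m : Nat) : (pvAcc arr m).length = arr.length := by
  induction m with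
  | zero => simp [pvAcc, pvDp0]
  | succ m ih => rw [pvAcc_succ]; simpa using ih

theorem pvAcc_getD (arr : List Int) (m j : Nat) (hj : j < m) (hm : m ≤ arr.length) :
    (pvAcc arr m).getD j 0 = pvD arr j := by
  induction m with
  | zero => omega
  | succ m ih =>
      rw [pvAcc_succ]
      rcases Nat.lt_succ_iff_lt_or_eq.mp hj with hjm | hjm
      · have hne : m ≠ j := by omega
        rw [List.getD_eq_getElem?_getD, List.getElem?_set_ne hne,
            ← List.getD_eq_getElem?_getD]
        exact ih hjm (by omega)
      · subst hjm
        have hlt : j < (pvAcc arr j).length := by rw [pvAcc_length]; omega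
        simp [List.getD_eq_getElem?_getD, hlt, pvD]

theorem pvD_eq_G (arr : List Int) (i : Nat) (hi : i ≤ arr.length) : pvD arr i = pvG arr i := by
  unfold pvD pvInnerA pvG
  apply pv_foldl_congr_mem
  intro c j hjm
  simp only [pvF]
  rw [pvAcc_getD arr i j (List.mem_range.mp hjm) hi]

theorem pvF_ge (arr : List Int) (i j : Nat) : pvD arr j ≤ pvF arr i j := by
  unfold pvF; split_ifs <;> omega

theorem pvF_pos (arr : List Int) (i j : Nat) (h : arr.getD j 0 < arr.getD i 0) :
    pvF arr i j = pvD arr j + 1 := by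
  unfold pvF; rw [if_pos h]

theorem pvF_neg (arr : List Int) (i j : Nat) (h : ¬ arr.getD j 0 < arr.getD i 0) :
    pvF arr i j = pvD arr j := by
  unfold pvF; rw [if_neg h]; omega

theorem pvD_one_le (arr : List Int) (i : Nat) (hi : i ≤ arr.length) : 1 ≤ pvD arr i := by
  rw [pvD_eq_G arr i hi]
  exact pv_le_foldl_max_init (pvF arr i) (List.range i) 1

theorem pvD_step (arr : List Int) (i : Nat) (hi : i + 1 ≤ arr.length) :
    pvD arr i ≤ pvD arr (i + 1) := by
  rw [pvD_eq_G arr (i + 1) hi]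
  exact le_trans (pvF_ge arr (i + 1) i)
    (pv_le_foldl_max_mem (pvF arr (i + 1)) (List.range (i + 1)) 1 i (by simp))

theorem pvD_mono (arr : List Int) {j i : Nat} (h : j ≤ i) (hi : i < arr.length) :
    pvD arr j ≤ pvD arr i := by
  induction i with
  | zero => have : j = 0 := by omega
            subst this; exact le_refl _
  | succ i ih =>
      rcases Nat.lt_succ_iff_lt_or_eq.mp (Nat.lt_succ_of_le h) with hj | hj
      · exact le_trans (ih (by omega) (by omega)) (pvD_step arr i (by omega))
      · subst hj; exact le_refl _

theorem pvLast_succ (arr : List Int) (x : Int) (m : Nat) :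
    pvLast arr x (m + 1) = if arr.getD m 0 < x then some m else pvLast arr x m := rfl

theorem pvLast_some (arr : List Int) (x : Int) (m k : Nat) (h : pvLast arr x m = some k) :
    k < m ∧ arr.getD k 0 < x ∧ ∀ j, k < j → j < m → ¬ arr.getD j 0 < x := by
  induction m with
  | zero =>
      rw [show pvLast arr x 0 = none from rfl] at h
      exact absurd h (by simp)
  | succ m ih =>
      rw [pvLast_succ] at h
      by_cases hc : arr.getD m 0 < x
      · rw [if_pos hc] at h
        injection h with h
        subst h
        exact ⟨Nat.lt_succ_self m, hc, fun j hj1 hj2 => by omega⟩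
      · rw [if_neg hc] at h
        obtain ⟨h1, h2, h3⟩ := ih h
        refine ⟨by omega, h2, fun j hj1 hj2 => ?_⟩
        rcases Nat.lt_succ_iff_lt_or_eq.mp hj2 with hj | hj
        · exact h3 j hj1 hj
        · subst hj; exact hc
theorem pvLast_none (arr : List Int) (x : Int) (m : Nat) (h : pvLast arr x m = none) :
    ∀ j, j < m → ¬ arr.getD j 0 < x := by
  induction m with
  | zero => omega
  | succ m ih =>
      rw [pvLast_succ] at h
      by_cases hc : arr.getD m 0 < x
      · rw [if_pos hc] at h; exact absurd h (by simp)
      · rw [if_neg hc] at h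
        intro j hj
        rcases Nat.lt_succ_iff_lt_or_eq.mp hj with hj' | hj'
        · exact ih h j hj'
        · subst hj'; exact hc
theorem pvD_zero (arr : List Int) : pvD arr 0 = 1 := by
  simp [pvD, pvInnerA]

-- recurrence: dp[m+1] = max(dp[m], dp[k]+1) for k the nearest previous smaller index
theorem pvD_rec (arr : List Int) (m : Nat) (hm : m + 1 < arr.length) :
    pvD arr (m + 1) =
      match pvLast arr (arr.getD (m + 1) 0) (m + 1) with
      | none => pvD arr m
      | some k => max (pvD arr m) (pvD arr k + 1) := by
  have hm' : m < arr.length := by omega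
  rw [pvD_eq_G arr (m + 1) (by omega)]
  cases hL : pvLast arr (arr.getD (m + 1) 0) (m + 1) with
  | none =>
      show pvG arr (m + 1) = pvD arr m
      have hnone := pvLast_none arr _ _ hL
      apply le_antisymm
      · apply pv_foldl_max_le
        · exact pvD_one_le arr m (by omega)
        · intro j hjm
          have hj := List.mem_range.mp hjm
          rw [pvF_neg arr (m + 1) j (hnone j hj)]
          exact pvD_mono arr (by omega) hm'
      · calc pvD arr m = pvF arr (m + 1) m := (pvF_neg arr (m + 1) m (hnone m (by omega))).symm
          _ ≤ _ := pv_le_foldl_max_mem (pvF arr (m + 1)) (List.range (m + 1)) 1 m (by simp)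
  | some k =>
      show pvG arr (m + 1) = max (pvD arr m) (pvD arr k + 1)
      obtain ⟨hk1, hk2, hk3⟩ := pvLast_some arr _ _ _ hL
      apply le_antisymm
      · apply pv_foldl_max_le
        · exact le_trans (pvD_one_le arr m (by omega)) (le_max_left _ _)
        · intro j hjm
          have hj := List.mem_range.mp hjm
          by_cases hlt : arr.getD j 0 < arr.getD (m + 1) 0
          · have hjk : j ≤ k := by
              by_contra hc
              exact hk3 j (by omega) hj hlt
            rw [pvF_pos arr (m + 1) j hlt]
            have := pvD_mono arr hjk (by omega)
            have := le_max_right (pvD arr m) (pvD arr k + 1)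
            omega
          · rw [pvF_neg arr (m + 1) j hlt]
            have := pvD_mono arr (show j ≤ m by omega) hm'
            have := le_max_left (pvD arr m) (pvD arr k + 1)
            omega
      · apply max_le
        · exact le_trans (pvF_ge arr (m + 1) m)
            (pv_le_foldl_max_mem (pvF arr (m + 1)) (List.range (m + 1)) 1 m (by simp))
        · calc pvD arr k + 1 = pvF arr (m + 1) k := (pvF_pos arr (m + 1) k hk2).symm
            _ ≤ _ := pv_le_foldl_max_mem (pvF arr (m + 1)) (List.range (m + 1)) 1 k
                      (by simp; omega)

theorem pvPop_cons (x v d : Int) (rest : List (Int × Int)) :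
    pvPop x ((v, d) :: rest) = if v ≥ x then pvPop x rest else (v, d) :: rest := rfl

theorem pvPop_map (arr : List Int) (x : Int) (l : List Nat) :
    pvPop x (l.map (fun j => (arr.getD j 0, pvD arr j))) =
      (l.dropWhile (fun j => decide (x ≤ arr.getD j 0))).map (fun j => (arr.getD j 0, pvD arr j)) := by
  induction l with
  | nil => rfl
  | cons j js ih =>
      rw [List.map_cons, pvPop_cons]
      by_cases hc : x ≤ arr.getD j 0
      · rw [if_pos hc, ih, List.dropWhile_cons_of_pos (by simp only [decide_eq_true_eq]; exact hc)]
      · rw [if_neg hc, List.dropWhile_cons_of_neg (by simp only [decide_eq_true_eq]; exact hc),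
            List.map_cons]
theorem pv_dropWhile_dropWhile {α : Type} (p q : α → Bool) (l : List α)
    (h : ∀ a, q a = true → p a = true) :
    (l.dropWhile q).dropWhile p = l.dropWhile p := by
  induction l with
  | nil => rfl
  | cons a l ih =>
      by_cases hq : q a = true
      · rw [List.dropWhile_cons_of_pos hq, List.dropWhile_cons_of_pos (h a hq), ih]
      · rw [List.dropWhile_cons_of_neg (by simpa using hq)]

theorem pvStk_succ (arr : List Int) (m : Nat) :
    pvStk arr (m + 1) =
      m :: (pvStk arr m).dropWhile (fun j => decide (arr.getD m 0 ≤ arr.getD j 0)) := rfl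

theorem pvStk_head (arr : List Int) (m : Nat) (x : Int) :
    ((pvStk arr m).dropWhile (fun j => decide (x ≤ arr.getD j 0))).head? = pvLast arr x m := by
  induction m with
  | zero => simp [pvStk, pvLast]
  | succ m ih =>
      rw [pvStk_succ]
      by_cases hc : arr.getD m 0 < x
      · rw [List.dropWhile_cons_of_neg (by simp only [decide_eq_true_eq]; exact not_le.mpr hc),
            List.head?_cons, pvLast_succ, if_pos hc]
      · rw [List.dropWhile_cons_of_pos (by simp only [decide_eq_true_eq]; exact not_lt.mp hc),
            pv_dropWhile_dropWhile _ _ _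
              (fun j hj => by
                simp only [decide_eq_true_eq] at hj ⊢
                exact le_trans (not_lt.mp hc) hj),
            ih, pvLast_succ, if_neg hc]
theorem pvB_invariant (arr : List Int) (m : Nat) (hm : m ≤ arr.length) :
    (arr.take m).foldl pvStepB ([], 0) =
      ((pvStk arr m).map (fun j => (arr.getD j 0, pvD arr j)),
        if m = 0 then 0 else pvD arr (m - 1)) := by
  induction m with
  | zero => simp [pvStk]
  | succ m ih =>
      have hmn : m < arr.length := by omega
      have hx : arr[m]? = some (arr.getD m 0) := by
        simp [List.getD_eq_getElem?_getD, List.getElem?_eq_getElem hmn]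
      have hhead := pvStk_head arr m (arr.getD m 0)
      rw [List.take_add_one, hx, List.foldl_append, ih (by omega)]
      simp only [Option.toList_some, List.foldl_cons, List.foldl_nil]
      unfold pvStepB
      dsimp only
      rw [pvPop_map arr (arr.getD m 0) (pvStk arr m)]
      cases hS : (pvStk arr m).dropWhile (fun j => decide (arr.getD m 0 ≤ arr.getD j 0)) with
      | nil =>
          rw [hS] at hhead
          simp only [List.head?_nil] at hhead
          by_cases hm0 : m = 0
          · subst hm0
            simp [pvStk, pvD_zero]
          · obtain ⟨m', rfl⟩ : ∃ m', m = m' + 1 := ⟨m - 1, by omega⟩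
            have hrec := pvD_rec arr m' (by omega)
            rw [← hhead] at hrec
            have hprev : pvD arr (m' + 1) = pvD arr m' := hrec
            have h1 : (1 : Int) ≤ pvD arr m' := pvD_one_le arr m' (by omega)
            rw [pvStk_succ, hS]
            simp [hprev, max_eq_left h1]
      | cons k rest =>
          rw [hS] at hhead
          simp only [List.head?_cons] at hhead
          have hm0 : m ≠ 0 := by
            intro h
            subst h
            rw [show pvLast arr (arr.getD 0 0) 0 = none from rfl] at hhead
            exact absurd hhead (by simp)
          obtain ⟨m', rfl⟩ : ∃ m', m = m' + 1 := ⟨m - 1, by omega⟩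
          have hrec := pvD_rec arr m' (by omega)
          rw [← hhead] at hrec
          have hprev : pvD arr (m' + 1) = max (pvD arr m') (pvD arr k + 1) := hrec
          have h1 : (1 : Int) ≤ pvD arr m' := pvD_one_le arr m' (by omega)
          rw [pvStk_succ, hS]
          simp [hprev, max_eq_left h1]

theorem pvA_final (arr : List Int) (h : arr ≠ []) :
    subsequent_num arr = pvD arr (arr.length - 1) := by
  have hn : 0 < arr.length := List.length_pos_iff.mpr h
  have heq : subsequent_num arr = (pvAcc arr arr.length).getD (arr.length - 1) 0 := rfl
  rw [heq]
  exact pvAcc_getD arr arr.length (arr.length - 1) (by omega) (le_refl _)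

theorem pvB_final (arr : List Int) (h : arr ≠ []) :
    subsequent_num_alt arr = pvD arr (arr.length - 1) := by
  have hn : 0 < arr.length := List.length_pos_iff.mpr h
  have hinv := pvB_invariant arr arr.length (le_refl _)
  rw [List.take_length] at hinv
  unfold subsequent_num_alt
  rw [hinv]
  simp [Nat.pos_iff_ne_zero.mp hn]

-- ===== VERDICT (by name: the statement is the Claim_ definition above) =====
theorem subsequent_num_spec : Claim_equal_subsequent_num := by
  intro arr _ hpre
  unfold Spec_subsequent_num
  rw [pvA_final arr hpre, pvB_final arr hpre]
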